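-- pv_equiv track=rewrite | github.com/saji-ha-nagerareta/sound-oekaki | audio2pen/vad.py | post_filter
-- ===== SOURCE A (Python) =====
-- def post_filter(label, pause_len):
--     if len(label) == 0:
--         return label
--
--     filtered_label = []
--     start = label[0]['start']
--     for i in range(1, len(label)):
--         if (label[i]['start'] - label[i-1]['end']) > pause_len:
--             filtered_label.append({'start': start, 'end': label[i-1]['end']})
--             start = label[i]['start']
--     filtered_label.append({'start': start, 'end': label[-1]['end']})
--
--     return filtered_label
-- ===== SOURCE B (Python) =====
-- def post_filter(label, pause_len):
--     n = len(label)
--     if n == 0: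
--         return label
--     cuts = [i for i in range(1, n)
--             if label[i]['start'] - label[i - 1]['end'] > pause_len]
--     bounds = [0] + cuts + [n]
--     return [{'start': label[a]['start'], 'end': label[b - 1]['end']}
--             for a, b in zip(bounds, bounds[1:])]
-- ===== Notes on version B (the rewrite author's own statement) =====
-- stated objective: alternative
-- what changed: B splits the work into two passes: it first collects the list of cut indices where the pause exceeds pause_len, then builds the merged segments by mapping over consecutive boundary pairs [0]+cuts+[n], instead of A's single loop threading a (filtered_label, start) accumulator.
import Mathlib
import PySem

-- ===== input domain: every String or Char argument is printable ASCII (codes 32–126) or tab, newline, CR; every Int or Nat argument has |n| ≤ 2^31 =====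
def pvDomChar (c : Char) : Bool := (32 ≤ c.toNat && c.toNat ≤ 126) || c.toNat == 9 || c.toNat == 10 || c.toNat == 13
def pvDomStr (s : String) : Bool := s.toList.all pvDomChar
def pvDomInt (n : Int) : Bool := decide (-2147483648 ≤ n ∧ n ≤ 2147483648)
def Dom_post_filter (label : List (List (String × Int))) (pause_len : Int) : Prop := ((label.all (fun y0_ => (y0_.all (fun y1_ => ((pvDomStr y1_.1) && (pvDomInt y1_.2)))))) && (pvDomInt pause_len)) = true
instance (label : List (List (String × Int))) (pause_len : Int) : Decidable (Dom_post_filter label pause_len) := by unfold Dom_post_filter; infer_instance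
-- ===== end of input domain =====

-- B merges pause-separated segments in two passes (cut indices, then boundary pairs) instead of A's single accumulator loop; same values everywhere on Pre_.

-- ===== PORT A =====
-- label[i]['start'] / label[i-1]['end']: index always in range inside the loop, key present by Pre_, so the defaults are unreachable
def pvGetA (label : List (List (String × Int))) (i : Int) (k : String) : Int :=
  ((((PySem.List.pyGet? label i).getD []).lookup k).getD 0)

def post_filter (label : List (List (String × Int))) (pause_len : Int) : List (List (String × Int)) :=
  if label.length = 0 then label
  else
    let st := (PySem.List.pyRange 1 (label.length : Int) 1).foldl
      (fun (acc : List (List (String × Int)) × Int) i =>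
        if pvGetA label i "start" - pvGetA label (i - 1) "end" > pause_len then
          (acc.1 ++ [[("start", acc.2), ("end", pvGetA label (i - 1) "end")]], pvGetA label i "start")
        else acc)
      ([], pvGetA label 0 "start")
    st.1 ++ [[("start", st.2), ("end", pvGetA label (-1) "end")]]

-- ===== PORT B =====
def pvGetB (label : List (List (String × Int))) (i : Int) (k : String) : Int :=
  ((((PySem.List.pyGet? label i).getD []).lookup k).getD 0)

def post_filter_alt (label : List (List (String × Int))) (pause_len : Int) : List (List (String × Int)) :=
  let n : Int := label.length
  if label.length = 0 then label
  else
    let cuts := (PySem.List.pyRange 1 n 1).filter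
      (fun i => decide (pvGetB label i "start" - pvGetB label (i - 1) "end" > pause_len))
    let bounds := 0 :: (cuts ++ [n])
    (bounds.zip bounds.tail).map
      (fun ab => [("start", pvGetB label ab.1 "start"), ("end", pvGetB label (ab.2 - 1) "end")])

-- ===== PRECONDITION & SPEC =====
-- Pre_ requires every element to own both keys (Python raises KeyError otherwise) and, being the image
-- of a Python dict, to have no duplicate keys (a duplicate-key association list represents no dict state).
def Pre_post_filter (label : List (List (String × Int))) (pause_len : Int) : Prop :=
  ∀ d ∈ label, (d.map Prod.fst).Nodup ∧
    (d.lookup "start").isSome ∧ (d.lookup "end").isSome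
instance (label : List (List (String × Int))) (pause_len : Int) : Decidable (Pre_post_filter label pause_len) := by unfold Pre_post_filter; infer_instance

def pvWitness_post_filter : (List (List (String × Int))) × Int :=
  ([[("start", 0), ("end", 2)], [("start", 5), ("end", 7)]], 1)

def Spec_post_filter (label : List (List (String × Int))) (pause_len : Int) (out : List (List (String × Int))) : Prop := out = post_filter_alt label pause_len
instance (label : List (List (String × Int))) (pause_len : Int) (out : List (List (String × Int))) : Decidable (Spec_post_filter label pause_len out) := by unfold Spec_post_filter; infer_instance

-- ===== CLAIM (what is proved, stated in full; the proofs are below) =====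
def Claim_equal_post_filter : Prop := ∀ (label : List (List (String × Int))) (pause_len : Int), Dom_post_filter label pause_len → Pre_post_filter label pause_len → Spec_post_filter label pause_len (post_filter label pause_len)

-- ===== LEMMAS AND PROOFS =====

-- the residual segments A's loop produces from start-value s over the remaining index list
def pvF (label : List (List (String × Int))) (pause_len : Int) (s : Int) :
    List Int → List (List (String × Int))
  | [] => [[("start", s), ("end", pvGetA label (-1) "end")]]
  | i :: L =>
      if pvGetA label i "start" - pvGetA label (i - 1) "end" > pause_len then
        [("start", s), ("end", pvGetA label (i - 1) "end")] :: pvF label pause_len (pvGetA label i "start") L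
      else pvF label pause_len s L

-- B's segments from a previous boundary index over the remaining cut list
def pvG (label : List (List (String × Int))) (prev : Int) :
    List Int → List (List (String × Int))
  | [] => [[("start", pvGetA label prev "start"), ("end", pvGetA label (-1) "end")]]
  | c :: cs =>
      [("start", pvGetA label prev "start"), ("end", pvGetA label (c - 1) "end")] :: pvG label c cs

theorem pvGetB_eq_A (label : List (List (String × Int))) (i : Int) (k : String) :
    pvGetB label i k = pvGetA label i k := rfl

theorem pvFold_eq_pvF (label : List (List (String × Int))) (pause_len : Int) :
    ∀ (L : List Int) (acc : List (List (String × Int))) (s : Int),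
      (L.foldl
        (fun (acc : List (List (String × Int)) × Int) i =>
          if pvGetA label i "start" - pvGetA label (i - 1) "end" > pause_len then
            (acc.1 ++ [[("start", acc.2), ("end", pvGetA label (i - 1) "end")]], pvGetA label i "start")
          else acc)
        (acc, s)).1 ++
        [[("start",
            (L.foldl
              (fun (acc : List (List (String × Int)) × Int) i =>
                if pvGetA label i "start" - pvGetA label (i - 1) "end" > pause_len then
                  (acc.1 ++ [[("start", acc.2), ("end", pvGetA label (i - 1) "end")]], pvGetA label i "start")
                else acc)
              (acc, s)).2),
          ("end", pvGetA label (-1) "end")]] =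
      acc ++ pvF label pause_len s L := by
  intro L
  induction L with
  | nil => intro acc s; simp [pvF]
  | cons i L ih =>
      intro acc s
      by_cases h : pvGetA label i "start" - pvGetA label (i - 1) "end" > pause_len
      · simp only [List.foldl_cons, if_pos h, pvF, ih]
        simp
      · simp only [List.foldl_cons, if_neg h, pvF, ih]

theorem pvF_filter_eq_pvG (label : List (List (String × Int))) (pause_len : Int) :
    ∀ (L : List Int) (prev : Int),
      pvF label pause_len (pvGetA label prev "start") L =
      pvG label prev
        (L.filter (fun i => decide (pvGetA label i "start" - pvGetA label (i - 1) "end" > pause_len))) := by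
  intro L
  induction L with
  | nil => intro prev; simp [pvF, pvG]
  | cons i L ih =>
      intro prev
      by_cases h : pvGetA label i "start" - pvGetA label (i - 1) "end" > pause_len
      · simp [pvF, pvG, h, ih i]
      · simp [pvF, h, ih prev]

theorem pvZip_eq_pvG (label : List (List (String × Int))) (n : Int) (hn : pvGetA label (n - 1) "end" = pvGetA label (-1) "end") :
    ∀ (cs : List Int) (prev : Int),
      (((prev :: (cs ++ [n])).zip (cs ++ [n])).map
        (fun ab => [("start", pvGetA label ab.1 "start"), ("end", pvGetA label (ab.2 - 1) "end")])) =
      pvG label prev cs := by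
  intro cs
  induction cs with
  | nil => intro prev; simp [pvG, hn]
  | cons c cs ih => intro prev; simp only [List.cons_append, List.zip_cons_cons, List.map_cons, pvG]
                    exact congrArg _ (ih c)

theorem pvLast_end (label : List (List (String × Int))) (h : label ≠ []) :
    pvGetA label ((label.length : Int) - 1) "end" = pvGetA label (-1) "end" := by
  unfold pvGetA
  rw [PySem.List.pyGet?_neg_one]
  have h1 : ((label.length : Int) - 1) = ((label.length - 1 : Nat) : Int) := by
    have : 0 < label.length := List.length_pos_iff.mpr h
    omega
  rw [h1, PySem.List.pyGet?_natCast]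
  rw [List.getLast?_eq_getElem?]

-- ===== VERDICT (by name: the statement is the Claim_ definition above) =====
theorem post_filter_spec : Claim_equal_post_filter := by
  intro label pause_len _ _
  unfold Spec_post_filter post_filter post_filter_alt
  by_cases h : label.length = 0
  · simp [h]
  · simp only [if_neg h]
    have hne : label ≠ [] := by
      intro e; exact h (by simp [e])
    have e1 := pvFold_eq_pvF label pause_len (PySem.List.pyRange 1 (label.length : Int) 1) [] (pvGetA label 0 "start")
    simp only [List.nil_append] at e1
    rw [e1, pvF_filter_eq_pvG label pause_len _ 0]
    simp only [pvGetB_eq_A]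
    exact (pvZip_eq_pvG label (label.length : Int) (pvLast_end label hne) _ 0).symm
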